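-- pv_equiv track=rewrite | github.com/Akashi169/Puzzle-Solver-AI | src/utils.py | create_observed_state
-- ===== SOURCE A (Python) =====
-- def create_observed_state(belief_state, blank_pos, observed_positions, partially_observable=False):
--     observed = [['?' for _ in range(3)] for _ in range(3)]
--
--     if not belief_state:
--         return observed
--
--     if blank_pos:
--         row, col = blank_pos
--         observed[row][col] = '0'
--
--     if not partially_observable:
--         for i in range(3):
--             for j in range(3):
--                 values = {state[i][j] for state in belief_state if isinstance(state, list) and len(state) == 3 and all(isinstance(r, list) and len(r) == 3 for r in state)}
--                 if len(values) == 1: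
--                     observed[i][j] = str(values.pop())
--     else:
--         for row, col in observed_positions:
--             values = {state[row][col] for state in belief_state if isinstance(state, list) and len(state) == 3 and all(isinstance(r, list) and len(r) == 3 for r in state)}
--             if len(values) == 1:
--                 observed[row][col] = str(values.pop())
--
--     return observed
-- ===== SOURCE B (Python) =====
-- def create_observed_state(belief_state, blank_pos, observed_positions, partially_observable=False):
--     observed = [['?'] * 3 for _ in range(3)]
--     if not belief_state:
--         return observed
--     if blank_pos:
--         row, col = blank_pos
--         observed[row][col] = '0'
--     # filter once, then build a state-major consensus table instead of
--     # re-scanning belief_state per cell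
--     valid = [s for s in belief_state
--              if isinstance(s, list) and len(s) == 3
--              and all(isinstance(r, list) and len(r) == 3 for r in s)]
--     cons = None
--     for s in valid:
--         if cons is None:
--             cons = [list(r) for r in s]
--         else:
--             for i in range(3):
--                 for j in range(3):
--                     if cons[i][j] is not None and cons[i][j] != s[i][j]:
--                         cons[i][j] = None
--     if cons is not None:
--         cells = (((i, j) for i in range(3) for j in range(3))
--                  if not partially_observable else observed_positions)
--         for i, j in cells:
--             v = cons[i][j]
--             if v is not None:
--                 observed[i][j] = str(v)
--     return observed
-- ===== Notes on version B (the rewrite author's own statement) =====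
-- stated objective: alternative
-- what changed: A rebuilds a value set by rescanning and revalidating the whole belief_state for every cell; B filters the valid 3x3 states once and makes a single state-major pass building a per-cell consensus table, then writes the observed grid from that table.
import Mathlib
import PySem

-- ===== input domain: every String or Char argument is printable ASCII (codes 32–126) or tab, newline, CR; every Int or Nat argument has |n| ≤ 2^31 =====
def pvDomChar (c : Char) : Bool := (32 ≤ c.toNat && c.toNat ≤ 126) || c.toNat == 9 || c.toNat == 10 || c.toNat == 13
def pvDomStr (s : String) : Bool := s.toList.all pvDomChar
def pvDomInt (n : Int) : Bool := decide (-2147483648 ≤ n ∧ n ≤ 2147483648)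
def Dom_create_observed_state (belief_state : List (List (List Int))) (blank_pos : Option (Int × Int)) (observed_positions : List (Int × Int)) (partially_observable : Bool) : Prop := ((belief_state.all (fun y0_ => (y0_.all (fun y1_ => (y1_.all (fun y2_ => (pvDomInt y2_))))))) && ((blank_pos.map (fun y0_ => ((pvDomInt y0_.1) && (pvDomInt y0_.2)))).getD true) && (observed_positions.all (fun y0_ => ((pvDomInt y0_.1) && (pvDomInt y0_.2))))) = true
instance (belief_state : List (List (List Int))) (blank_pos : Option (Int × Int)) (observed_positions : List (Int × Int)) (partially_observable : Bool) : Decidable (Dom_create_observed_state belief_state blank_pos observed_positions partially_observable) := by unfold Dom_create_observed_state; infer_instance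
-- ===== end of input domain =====

-- B replaces A's cell-major repeated rescans of belief_state (one set comprehension per cell)
-- by one filtering pass plus a state-major consensus table; objective: alternative decomposition.
-- (Mutation note: neither A nor B mutates its arguments.)

-- ===== PORT A =====
-- shared primitive helpers: Python's `state[i][j]` read and `observed[i][j] = v` write
def pvCell (s : List (List Int)) (i j : Int) : Int :=
  PySem.List.pyGetD (PySem.List.pyGetD s i []) j 0

def pvSet2 (g : List (List String)) (i j : Int) (v : String) : List (List String) :=
  PySem.List.pySetD g i (PySem.List.pySetD (PySem.List.pyGetD g i []) j v)

-- the filter predicate `isinstance(state, list) and len(state) == 3 and all(... len(r) == 3 ...)`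
def pvIsValid (s : List (List Int)) : Bool :=
  s.length == 3 && s.all (fun r => r.length == 3)

-- `{state[i][j] for state in belief_state if <valid>}`
def pvValuesA (bs : List (List (List Int))) (i j : Int) : PySem.Set Int :=
  bs.foldl (fun acc s => if pvIsValid s then PySem.Set.add acc (pvCell s i j) else acc)
    PySem.Set.empty

-- A's loop body: `values = {...}; if len(values) == 1: observed[r][c] = str(values.pop())`
def pvStepA (bs : List (List (List Int))) (obs : List (List String)) (rc : Int × Int) :
    List (List String) :=
  let values := pvValuesA bs rc.1 rc.2
  if PySem.Set.len values = 1 then pvSet2 obs rc.1 rc.2 (PySem.Int.toStr (values.headD 0))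
  else obs

def create_observed_state (belief_state : List (List (List Int))) (blank_pos : Option (Int × Int)) (observed_positions : List (Int × Int)) (partially_observable : Bool) : List (List String) :=
  let observed : List (List String) :=
    (List.range 3).map (fun _ => (List.range 3).map (fun _ => "?"))
  if belief_state = [] then observed
  else
    let observed :=
      match blank_pos with
      | some (row, col) => pvSet2 observed row col "0"
      | none => observed
    if !partially_observable then
      (PySem.List.pyRange 0 3 1).foldl (fun obs i =>
        (PySem.List.pyRange 0 3 1).foldl (fun obs j => pvStepA belief_state obs (i, j)) obs)
        observed
    else
      observed_positions.foldl (pvStepA belief_state) observed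

-- ===== PORT B =====
-- one state of B's state-major loop: first valid state seeds the table, later states
-- blank out every cell they disagree on
def pvConsStep (c : Option (List (List (Option Int)))) (s : List (List Int)) :
    Option (List (List (Option Int))) :=
  match c with
  | none => some (s.map (fun r => r.map some))
  | some t =>
      some ((List.range 3).map (fun i => (List.range 3).map (fun j =>
        match (t.getD i []).getD j none with
        | none => none
        | some v => if v = pvCell s (i : Int) (j : Int) then some v else none)))

-- `cons[i][j]` with Python indexing
def pvTCell (t : List (List (Option Int))) (i j : Int) : Option Int :=
  PySem.List.pyGetD (PySem.List.pyGetD t i []) j none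

-- B's write-back loop body
def pvStepB (t : List (List (Option Int))) (obs : List (List String)) (rc : Int × Int) :
    List (List String) :=
  match pvTCell t rc.1 rc.2 with
  | none => obs
  | some v => pvSet2 obs rc.1 rc.2 (PySem.Int.toStr v)

def create_observed_state_alt (belief_state : List (List (List Int))) (blank_pos : Option (Int × Int)) (observed_positions : List (Int × Int)) (partially_observable : Bool) : List (List String) :=
  let observed : List (List String) :=
    (List.range 3).map (fun _ => (List.range 3).map (fun _ => "?"))
  if belief_state = [] then observed
  else
    let observed :=
      match blank_pos with
      | some (row, col) => pvSet2 observed row col "0"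
      | none => observed
    let valid := belief_state.filter pvIsValid
    match valid.foldl pvConsStep none with
    | none => observed
    | some t =>
        let cells : List (Int × Int) :=
          if !partially_observable then
            (PySem.List.pyRange 0 3 1).flatMap
              (fun i => (PySem.List.pyRange 0 3 1).map (fun j => (i, j)))
          else observed_positions
        cells.foldl (pvStepB t) observed

-- ===== PRECONDITION & SPEC =====
def pvInR (p : Int × Int) : Bool := decide (-3 ≤ p.1 ∧ p.1 < 3 ∧ -3 ≤ p.2 ∧ p.2 < 3)

-- Pre_ excludes exactly the inputs where Python A raises an IndexError: a blank position
-- outside Python's index range [-3, 3) while belief_state is nonempty, or (in partial mode,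
-- when some valid 3×3 state exists) an observed position outside that range.
def Pre_create_observed_state (belief_state : List (List (List Int))) (blank_pos : Option (Int × Int)) (observed_positions : List (Int × Int)) (partially_observable : Bool) : Prop :=
  belief_state ≠ [] →
    ((blank_pos.map pvInR).getD true = true ∧
     (partially_observable = true → (∃ s ∈ belief_state, pvIsValid s = true) →
        observed_positions.all pvInR = true))
instance (belief_state : List (List (List Int))) (blank_pos : Option (Int × Int)) (observed_positions : List (Int × Int)) (partially_observable : Bool) : Decidable (Pre_create_observed_state belief_state blank_pos observed_positions partially_observable) := by unfold Pre_create_observed_state; infer_instance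

def pvWitness_create_observed_state : List (List (List Int)) × (Option (Int × Int)) × (List (Int × Int)) × Bool :=
  ([[[1, 2, 3], [4, 5, 6], [7, 8, 0]], [[1, 2, 3], [4, 5, 6], [7, 8, 0]]], some (2, 2), [(0, 0), (-1, 1)], true)

def Spec_create_observed_state (belief_state : List (List (List Int))) (blank_pos : Option (Int × Int)) (observed_positions : List (Int × Int)) (partially_observable : Bool) (out : List (List String)) : Prop := out = create_observed_state_alt belief_state blank_pos observed_positions partially_observable
instance (belief_state : List (List (List Int))) (blank_pos : Option (Int × Int)) (observed_positions : List (Int × Int)) (partially_observable : Bool) (out : List (List String)) : Decidable (Spec_create_observed_state belief_state blank_pos observed_positions partially_observable out) := by unfold Spec_create_observed_state; infer_instance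

-- ===== CLAIM (what is proved, stated in full; the proofs are below) =====
def Claim_equal_create_observed_state : Prop := ∀ (belief_state : List (List (List Int))) (blank_pos : Option (Int × Int)) (observed_positions : List (Int × Int)) (partially_observable : Bool), Dom_create_observed_state belief_state blank_pos observed_positions partially_observable → Pre_create_observed_state belief_state blank_pos observed_positions partially_observable → Spec_create_observed_state belief_state blank_pos observed_positions partially_observable (create_observed_state belief_state blank_pos observed_positions partially_observable)

-- ===== LEMMAS AND PROOFS =====

theorem pv_witness_ok :
    Dom_create_observed_state (pvWitness_create_observed_state.1) (pvWitness_create_observed_state.2.1) (pvWitness_create_observed_state.2.2.1) (pvWitness_create_observed_state.2.2.2) ∧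
    Pre_create_observed_state (pvWitness_create_observed_state.1) (pvWitness_create_observed_state.2.1) (pvWitness_create_observed_state.2.2.1) (pvWitness_create_observed_state.2.2.2) := by
  decide


-- proof-side helpers: Python's index normalisation for a length-3 list
def pvNorm (i : Int) : Nat := (if i < 0 then i + 3 else i).toNat

theorem pvNorm_natCast (n : Nat) : pvNorm (n : Int) = n := by
  unfold pvNorm; split <;> omega

theorem pvNorm_lt (i : Int) (h1 : -3 ≤ i) (h2 : i < 3) : pvNorm i < 3 := by
  unfold pvNorm; split <;> omega

theorem pyGetD_len3 {α : Type} (xs : List α) (d : α) (i : Int) (h3 : xs.length = 3)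
    (h1 : -3 ≤ i) (h2 : i < 3) : PySem.List.pyGetD xs i d = xs.getD (pvNorm i) d := by
  match xs, h3 with
  | [a, b, c], _ =>
    interval_cases i <;> simp [PySem.List.pyGetD, PySem.List.pyGet?, pvNorm] <;> rfl

theorem valuesA_eq (bs : List (List (List Int))) (i j : Int) :
    pvValuesA bs i j =
      PySem.Set.ofList ((bs.filter pvIsValid).map (fun s => pvCell s i j)) := by
  unfold pvValuesA
  rw [PySem.List.foldl_if_eq_foldl_filter, PySem.Set.ofList_eq_foldl, List.foldl_map]
  rfl

theorem foldl_add_const (v : Int) (l : List Int) (h : ∀ x ∈ l, x = v) :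
    l.foldl PySem.Set.add [v] = [v] := by
  induction l with
  | nil => rfl
  | cons a l ih =>
    have ha : a = v := h a (by simp)
    subst ha
    have : PySem.Set.add [a] a = [a] := by
      simp [PySem.Set.add, PySem.Set.contains]
    simp only [List.foldl_cons, this]
    exact ih (fun x hx => h x (by simp [hx]))

theorem ofList_cons_all (c0 : Int) (l : List Int) (h : ∀ x ∈ l, x = c0) :
    PySem.Set.ofList (c0 :: l) = [c0] := by
  rw [PySem.Set.ofList_eq_foldl]
  simp only [List.foldl_cons]
  have : PySem.Set.add [] c0 = [c0] := by simp [PySem.Set.add, PySem.Set.contains]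
  rw [show PySem.Set.add ([] : PySem.Set Int) c0 = [c0] from this]
  exact foldl_add_const c0 l h

theorem ofList_cons_len_ne (c0 : Int) (l : List Int) (h : ¬ ∀ x ∈ l, x = c0) :
    (PySem.Set.ofList (c0 :: l)).length ≠ 1 := by
  push Not at h
  obtain ⟨x, hx, hne⟩ := h
  intro hlen
  have hc0 : c0 ∈ PySem.Set.ofList (c0 :: l) := by
    rw [PySem.Set.mem_ofList]; simp
  have hxm : x ∈ PySem.Set.ofList (c0 :: l) := by
    rw [PySem.Set.mem_ofList]; simp [hx]
  match hs : PySem.Set.ofList (c0 :: l), hlen with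
  | [v], _ =>
    rw [hs] at hc0 hxm
    simp at hc0 hxm
    exact hne (by rw [hxm, hc0])

theorem consFold (rest : List (List (List Int))) :
    ∀ (t : List (List (Option Int))), t.length = 3 → (∀ r ∈ t, r.length = 3) →
    ∃ t', rest.foldl pvConsStep (some t) = some t' ∧ t'.length = 3 ∧
      (∀ r ∈ t', r.length = 3) ∧
      ∀ ni nj : Nat, ni < 3 → nj < 3 →
        (t'.getD ni []).getD nj none =
          match (t.getD ni []).getD nj none with
          | none => none
          | some v => if (∀ s ∈ rest, pvCell s ni nj = v) then some v else none := by
  induction rest with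
  | nil =>
    intro t h3 hr
    refine ⟨t, rfl, h3, hr, ?_⟩
    intro ni nj hni hnj
    cases hcell : (t.getD ni []).getD nj none <;> simp
  | cons s rest ih =>
    intro t h3 hr
    have hstep : pvConsStep (some t) s =
        some ((List.range 3).map (fun i => (List.range 3).map (fun j =>
          match (t.getD i []).getD j none with
          | none => none
          | some v => if v = pvCell s (i : Int) (j : Int) then some v else none))) := rfl
    set t1 := (List.range 3).map (fun i => (List.range 3).map (fun j =>
          match (t.getD i []).getD j none with
          | none => none
          | some v => if v = pvCell s (i : Int) (j : Int) then some v else none)) with ht1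
    have ht13 : t1.length = 3 := by simp [ht1]
    have ht1r : ∀ r ∈ t1, r.length = 3 := by
      intro r hrm
      rw [ht1] at hrm
      simp only [List.mem_map, List.mem_range] at hrm
      obtain ⟨i, _, hri⟩ := hrm
      simp [← hri]
    have ht1cell : ∀ ni nj : Nat, ni < 3 → nj < 3 →
        (t1.getD ni []).getD nj none =
          match (t.getD ni []).getD nj none with
          | none => none
          | some v => if v = pvCell s (ni : Int) (nj : Int) then some v else none := by
      intro ni nj hni hnj
      rw [ht1]
      simp [List.getD, List.getElem?_map, List.getElem?_range, hni, hnj]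
    obtain ⟨t', hft, h3', hr', hcell'⟩ := ih t1 ht13 ht1r
    refine ⟨t', by simpa [List.foldl_cons, hstep] using hft, h3', hr', ?_⟩
    intro ni nj hni hnj
    rw [hcell' ni nj hni hnj, ht1cell ni nj hni hnj]
    cases hc : (t.getD ni []).getD nj none with
    | none => simp
    | some v =>
      simp only []
      by_cases hvs : v = pvCell s (ni : Int) (nj : Int)
      · simp only [if_pos hvs]
        by_cases hall : ∀ s' ∈ rest, pvCell s' (ni : Int) (nj : Int) = v
        · rw [if_pos hall, if_pos ?_]
          intro s' hs'
          rcases List.mem_cons.mp hs' with h | h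
          · subst h; exact hvs.symm
          · exact hall s' h
        · rw [if_neg hall, if_neg (by intro hforall; exact hall (fun s' hs' => hforall s' (by simp [hs'])))]
      · simp only [if_neg hvs]
        rw [if_neg (by intro hforall; exact hvs ((hforall s (by simp)).symm))]

theorem consSeed (s0 : List (List Int)) (h : pvIsValid s0 = true) :
    (s0.map (fun r => r.map some)).length = 3 ∧
    (∀ r ∈ s0.map (fun r => r.map some), r.length = 3) ∧
    (∀ ni nj : Nat, ni < 3 → nj < 3 →
      ((s0.map (fun r => r.map some)).getD ni []).getD nj none =
        some (pvCell s0 (ni : Int) (nj : Int))) := by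
  simp only [pvIsValid, Bool.and_eq_true, beq_iff_eq, List.all_eq_true] at h
  obtain ⟨h3, hrows⟩ := h
  refine ⟨by simp [h3], ?_, ?_⟩
  · intro r hrm
    simp only [List.mem_map] at hrm
    obtain ⟨r0, hr0, hr⟩ := hrm
    have := hrows r0 hr0
    simp at this
    simp [← hr, this]
  · intro ni nj hni hnj
    have hni' : ni < s0.length := by omega
    have hrow : s0[ni] ∈ s0 := List.getElem_mem hni'
    have hrl : s0[ni].length = 3 := by
      have := hrows s0[ni] hrow; simpa using this
    have hnj' : nj < s0[ni].length := by omega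
    have hgd : s0.getD ni [] = s0[ni] := by
      simp [List.getD, List.getElem?_eq_getElem hni']
    rw [pvCell, pyGetD_len3 s0 [] ni h3 (by omega) (by omega), pvNorm_natCast]
    rw [pyGetD_len3 (s0.getD ni []) 0 nj (by rw [hgd, hrl]) (by omega) (by omega),
        pvNorm_natCast]
    rw [hgd]
    simp [List.getD, List.getElem?_eq_getElem hni', List.getElem?_eq_getElem hnj']

theorem pvCell_norm (s : List (List Int)) (hv : pvIsValid s = true) (i j : Int)
    (h1 : -3 ≤ i) (h2 : i < 3) (h3 : -3 ≤ j) (h4 : j < 3) :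
    pvCell s i j = pvCell s ((pvNorm i : Nat) : Int) ((pvNorm j : Nat) : Int) := by
  simp only [pvIsValid, Bool.and_eq_true, beq_iff_eq, List.all_eq_true] at hv
  obtain ⟨hl, hrows⟩ := hv
  have hni : pvNorm i < 3 := pvNorm_lt i h1 h2
  have hrow : s.getD (pvNorm i) [] = s[pvNorm i] := by
    simp [List.getD, List.getElem?_eq_getElem (by omega : pvNorm i < s.length)]
  have hrl : (s.getD (pvNorm i) []).length = 3 := by
    rw [hrow]
    have := hrows s[pvNorm i] (List.getElem_mem (by omega)); simpa using this
  unfold pvCell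
  rw [pyGetD_len3 s [] i hl h1 h2, pyGetD_len3 (s.getD (pvNorm i) []) 0 j hrl h3 h4,
      pyGetD_len3 s [] ((pvNorm i : Nat) : Int) hl (by omega) (by exact_mod_cast hni),
      pvNorm_natCast,
      pyGetD_len3 (s.getD (pvNorm i) []) 0 ((pvNorm j : Nat) : Int) hrl (by omega)
        (by exact_mod_cast pvNorm_lt j h3 h4),
      pvNorm_natCast]

theorem pvTCell_norm (t : List (List (Option Int))) (h3 : t.length = 3)
    (hr : ∀ r ∈ t, r.length = 3) (i j : Int)
    (hi1 : -3 ≤ i) (hi2 : i < 3) (hj1 : -3 ≤ j) (hj2 : j < 3) :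
    pvTCell t i j = (t.getD (pvNorm i) []).getD (pvNorm j) none := by
  have hni : pvNorm i < 3 := pvNorm_lt i hi1 hi2
  have hrl : (t.getD (pvNorm i) []).length = 3 := by
    have : t.getD (pvNorm i) [] = t[pvNorm i] := by
      simp [List.getD, List.getElem?_eq_getElem (by omega : pvNorm i < t.length)]
    rw [this]
    exact hr t[pvNorm i] (List.getElem_mem (by omega))
  unfold pvTCell
  rw [pyGetD_len3 t [] i h3 hi1 hi2, pyGetD_len3 (t.getD (pvNorm i) []) none j hrl hj1 hj2]

theorem step_eq (bs : List (List (List Int))) (s0 : List (List Int))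
    (rest : List (List (List Int))) (t' : List (List (Option Int)))
    (hv : bs.filter pvIsValid = s0 :: rest)
    (ht3 : t'.length = 3) (htr : ∀ r ∈ t', r.length = 3)
    (hcell : ∀ ni nj : Nat, ni < 3 → nj < 3 →
      (t'.getD ni []).getD nj none =
        if (∀ s ∈ rest, pvCell s (ni : Int) (nj : Int) = pvCell s0 (ni : Int) (nj : Int))
        then some (pvCell s0 (ni : Int) (nj : Int)) else none)
    (obs : List (List String)) (p : Int × Int) (hp : pvInR p = true) :
    pvStepA bs obs p = pvStepB t' obs p := by
  obtain ⟨i, j⟩ := p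
  simp only [pvInR, decide_eq_true_eq] at hp
  obtain ⟨hi1, hi2, hj1, hj2⟩ := hp
  have hni := pvNorm_lt i hi1 hi2
  have hnj := pvNorm_lt j hj1 hj2
  have hvalid : ∀ s ∈ s0 :: rest, pvIsValid s = true := by
    intro s hs
    rw [← hv] at hs
    exact (List.mem_filter.mp hs).2
  have hnormall : ∀ s ∈ s0 :: rest,
      pvCell s i j = pvCell s ((pvNorm i : Nat) : Int) ((pvNorm j : Nat) : Int) :=
    fun s hs => pvCell_norm s (hvalid s hs) i j hi1 hi2 hj1 hj2
  have hB : pvTCell t' i j =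
      if (∀ s ∈ rest, pvCell s ((pvNorm i : Nat) : Int) ((pvNorm j : Nat) : Int)
            = pvCell s0 ((pvNorm i : Nat) : Int) ((pvNorm j : Nat) : Int))
      then some (pvCell s0 ((pvNorm i : Nat) : Int) ((pvNorm j : Nat) : Int)) else none := by
    rw [pvTCell_norm t' ht3 htr i j hi1 hi2 hj1 hj2]
    exact hcell (pvNorm i) (pvNorm j) hni hnj
  simp only [pvStepA, pvStepB, valuesA_eq, hv, List.map_cons]
  by_cases hall : ∀ s ∈ rest,
      pvCell s ((pvNorm i : Nat) : Int) ((pvNorm j : Nat) : Int)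
        = pvCell s0 ((pvNorm i : Nat) : Int) ((pvNorm j : Nat) : Int)
  · have hall' : ∀ x ∈ rest.map (fun s => pvCell s i j), x = pvCell s0 i j := by
      intro x hx
      obtain ⟨s, hs, rfl⟩ := List.mem_map.mp hx
      rw [hnormall s (by simp [hs]), hall s hs, ← hnormall s0 (by simp)]
    rw [ofList_cons_all (pvCell s0 i j) _ hall']
    rw [hB, if_pos hall]
    have hlen : PySem.Set.len [pvCell s0 i j] = 1 := by
      simp [PySem.Set.len]
    rw [if_pos hlen]
    simp only [List.headD]
    rw [← hnormall s0 (by simp)]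
  · have hne : ¬ ∀ x ∈ rest.map (fun s => pvCell s i j), x = pvCell s0 i j := by
      intro hforall
      apply hall
      intro s hs
      have := hforall (pvCell s i j) (List.mem_map.mpr ⟨s, hs, rfl⟩)
      rw [← hnormall s (by simp [hs]), this, hnormall s0 (by simp)]
    have hlen := ofList_cons_len_ne (pvCell s0 i j) _ hne
    rw [hB, if_neg hall]
    rw [if_neg (by
      intro h1
      apply hlen
      have : PySem.Set.len (PySem.Set.ofList (pvCell s0 i j :: rest.map (fun s => pvCell s i j)))
          = ((PySem.Set.ofList (pvCell s0 i j :: rest.map (fun s => pvCell s i j))).length : Int) := by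
        simp [PySem.Set.len]
      rw [this] at h1
      exact_mod_cast h1)]

theorem foldA_nil (bs : List (List (List Int))) (hv : bs.filter pvIsValid = []) :
    ∀ (ops : List (Int × Int)) (obs : List (List String)),
      ops.foldl (pvStepA bs) obs = obs := by
  intro ops
  induction ops with
  | nil => intro obs; rfl
  | cons p ops ih =>
    intro obs
    have hstep : pvStepA bs obs p = obs := by
      unfold pvStepA
      rw [valuesA_eq, hv]
      rfl
    rw [List.foldl_cons, hstep, ih]

theorem nested_flat (f : List (List String) → Int × Int → List (List String))
    (xs ys : List Int) : ∀ init,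
    xs.foldl (fun o i => ys.foldl (fun o j => f o (i, j)) o) init
      = (xs.flatMap (fun i => ys.map (fun j => (i, j)))).foldl f init := by
  induction xs with
  | nil => intro init; rfl
  | cons x xs ihx =>
    intro init
    simp only [List.flatMap_cons, List.foldl_append, List.foldl_cons, List.foldl_map, ihx]

theorem main_eq (bs : List (List (List Int))) (ops : List (Int × Int)) (po : Bool)
    (obs1 : List (List String))
    (hops : po = true → (∃ s ∈ bs, pvIsValid s = true) → ops.all pvInR = true) :
    (if !po then
       (PySem.List.pyRange 0 3 1).foldl (fun obs i =>
         (PySem.List.pyRange 0 3 1).foldl (fun obs j => pvStepA bs obs (i, j)) obs) obs1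
     else ops.foldl (pvStepA bs) obs1)
    = (match (bs.filter pvIsValid).foldl pvConsStep none with
       | none => obs1
       | some t =>
         (if !po then
            (PySem.List.pyRange 0 3 1).flatMap
              (fun i => (PySem.List.pyRange 0 3 1).map (fun j => (i, j)))
          else ops).foldl (pvStepB t) obs1) := by
  cases hval : bs.filter pvIsValid with
  | nil =>
    simp only [List.foldl_nil]
    cases po
    · simp only [Bool.not_false, if_true]
      rw [nested_flat]
      exact foldA_nil bs hval _ obs1
    · simp only [Bool.not_true, if_false]
      exact foldA_nil bs hval ops obs1
  | cons s0 rest =>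
    have hs0m : s0 ∈ bs.filter pvIsValid := by rw [hval]; simp
    have hs0v : pvIsValid s0 = true := (List.mem_filter.mp hs0m).2
    obtain ⟨seed3, seedr, seedcell⟩ := consSeed s0 hs0v
    obtain ⟨t', hft, ht3, htr, hcell⟩ :=
      consFold rest (s0.map (fun r => r.map some)) seed3 seedr
    have hfold : List.foldl pvConsStep none (s0 :: rest) = some t' := by
      simp only [List.foldl_cons]
      exact hft
    have hcell' : ∀ ni nj : Nat, ni < 3 → nj < 3 →
        (t'.getD ni []).getD nj none =
          if (∀ s ∈ rest, pvCell s (ni : Int) (nj : Int) = pvCell s0 (ni : Int) (nj : Int))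
          then some (pvCell s0 (ni : Int) (nj : Int)) else none := by
      intro ni nj hni hnj
      rw [hcell ni nj hni hnj, seedcell ni nj hni hnj]
    rw [hfold]
    cases po
    · simp only [Bool.not_false, if_true]
      rw [nested_flat]
      apply PySem.List.foldl_congr_mem'
      intro p hp acc
      apply step_eq bs s0 rest t' hval ht3 htr hcell' acc p
      simp only [List.mem_flatMap, List.mem_map] at hp
      obtain ⟨i, hi, j, hj, rfl⟩ := hp
      rw [PySem.List.mem_pyRange_one] at hi hj
      simp only [pvInR, decide_eq_true_eq]
      omega
    · simp only [Bool.not_true, if_false]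
      have hex : ∃ s ∈ bs, pvIsValid s = true :=
        ⟨s0, (List.mem_filter.mp hs0m).1, hs0v⟩
      have hall := hops rfl hex
      apply PySem.List.foldl_congr_mem'
      intro p hp acc
      exact step_eq bs s0 rest t' hval ht3 htr hcell' acc p
        ((List.all_eq_true.mp hall) p hp)

-- ===== VERDICT (by name: the statement is the Claim_ definition above) =====
theorem create_observed_state_spec : Claim_equal_create_observed_state := by
  unfold Claim_equal_create_observed_state
  intro bs bp ops po _hDom hPre
  unfold Spec_create_observed_state
  by_cases hbs : bs = []
  · subst hbs; rfl
  · obtain ⟨_hbp, hops⟩ := hPre hbs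
    unfold create_observed_state create_observed_state_alt
    simp only [if_neg hbs]
    rcases bp with _ | ⟨r, c⟩ <;>
      exact (main_eq bs ops po _ hops).symm ▸ (main_eq bs ops po _ hops)
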